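-- pv_equiv track=rewrite | github.com/SharkFace447/fantasy-stocks | api/app.py | get_snake_order
-- ===== SOURCE A (Python) =====
-- def get_snake_order(players, total_rounds):
--     order = []
--     for i in range(total_rounds):
--         if i % 2 == 0:
--             order.extend(players)
--         else:
--             order.extend(reversed(players))
--     return order
-- ===== SOURCE B (Python) =====
-- def get_snake_order(players, total_rounds):
--     n = len(players)
--     return [players[j % n] if (j // n) % 2 == 0 else players[n - 1 - j % n]
--             for j in range(total_rounds * n)]
-- ===== Notes on version B (the rewrite author's own statement) =====
-- stated objective: alternative
-- what changed: B replaces A's round-by-round loop that extends forward/reversed copies with a single flat comprehension over j in range(total_rounds*n), picking players[j%n] or players[n-1-j%n] by the parity of j//n.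
import Mathlib
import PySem

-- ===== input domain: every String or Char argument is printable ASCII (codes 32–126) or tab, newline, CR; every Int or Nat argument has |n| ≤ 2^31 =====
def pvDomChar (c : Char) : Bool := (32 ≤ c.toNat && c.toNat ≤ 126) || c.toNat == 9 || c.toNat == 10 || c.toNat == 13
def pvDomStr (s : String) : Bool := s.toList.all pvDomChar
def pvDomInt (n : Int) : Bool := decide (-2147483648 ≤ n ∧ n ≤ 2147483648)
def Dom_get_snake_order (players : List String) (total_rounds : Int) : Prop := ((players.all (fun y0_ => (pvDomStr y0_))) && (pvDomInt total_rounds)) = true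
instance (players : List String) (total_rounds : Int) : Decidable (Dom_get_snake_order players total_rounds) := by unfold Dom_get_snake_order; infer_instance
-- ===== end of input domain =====

-- B rebuilds the same snake order by pure index arithmetic (one flat comprehension) instead of
-- extending forward/reversed copies round by round; objective: alternative decomposition.

-- ===== PORT A =====
def get_snake_order (players : List String) (total_rounds : Int) : List String :=
  (PySem.List.pyRange 0 total_rounds 1).foldl
    (fun order i =>
      if PySem.Int.mod i 2 = 0 then order ++ players else order ++ players.reverse) []

-- ===== PORT B =====
def get_snake_order_alt (players : List String) (total_rounds : Int) : List String :=
  -- n = len(players)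
  (PySem.List.pyRange 0 (total_rounds * (players.length : Int)) 1).map
    (fun j =>
      if PySem.Int.mod (PySem.Int.floordiv j (players.length : Int)) 2 = 0 then
        PySem.List.pyGetD players (PySem.Int.mod j (players.length : Int)) ""
      else
        PySem.List.pyGetD players ((players.length : Int) - 1 - PySem.Int.mod j (players.length : Int)) "")

-- ===== PRECONDITION & SPEC =====
def Spec_get_snake_order (players : List String) (total_rounds : Int) (out : List String) : Prop := out = get_snake_order_alt players total_rounds
instance (players : List String) (total_rounds : Int) (out : List String) : Decidable (Spec_get_snake_order players total_rounds out) := by unfold Spec_get_snake_order; infer_instance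

-- ===== CLAIM (what is proved, stated in full; the proofs are below) =====
def Claim_equal_get_snake_order : Prop := ∀ (players : List String) (total_rounds : Int), Dom_get_snake_order players total_rounds → Spec_get_snake_order players total_rounds (get_snake_order players total_rounds)

-- ===== LEMMAS AND PROOFS =====

-- A's loop as a flatMap of per-round blocks
lemma foldl_extend_eq_flatMap {α β : Type} (g : α → List β) :
    ∀ (l : List α) (acc : List β),
      l.foldl (fun o i => o ++ g i) acc = acc ++ l.flatMap g := by
  intro l
  induction l with
  | nil => simp
  | cons x xs ih => intro acc; simp [List.foldl_cons, ih, List.flatMap_cons]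

lemma getSnake_flatMap (players : List String) (t : Int) :
    get_snake_order players t =
      (PySem.List.pyRange 0 t 1).flatMap
        (fun i => if PySem.Int.mod i 2 = 0 then players else players.reverse) := by
  unfold get_snake_order
  have hf : (fun (order : List String) (i : Int) =>
      if PySem.Int.mod i 2 = 0 then order ++ players else order ++ players.reverse)
      = (fun order i => order ++ (if PySem.Int.mod i 2 = 0 then players else players.reverse)) := by
    funext o i; split <;> rfl
  rw [hf, foldl_extend_eq_flatMap (fun i => if PySem.Int.mod i 2 = 0 then players else players.reverse)
        (PySem.List.pyRange 0 t 1) []]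
  simp

lemma map_getD_range {α : Type} [Inhabited α] (xs : List α) (d : α) :
    (List.range xs.length).map (fun p => xs.getD p d) = xs := by
  apply List.ext_getElem
  · simp
  · intro i h1 h2
    simp at h1
    simp [List.getD_eq_getElem?_getD, List.getElem?_eq_getElem h2]

lemma map_getD_range_rev {α : Type} [Inhabited α] (xs : List α) (d : α) :
    (List.range xs.length).map (fun p => xs.getD (xs.length - 1 - p) d) = xs.reverse := by
  apply List.ext_getElem
  · simp
  · intro i h1 h2
    simp only [List.getElem_map, List.getElem_range, List.getElem_reverse]
    simp at h1
    have hlt : xs.length - 1 - i < xs.length := by omega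
    rw [List.getD_eq_getElem?_getD, List.getElem?_eq_getElem hlt]
    simp only [Option.getD_some]

-- one round's chunk of B equals that round's block of A
lemma chunk_lemma (players : List String) (hne : players ≠ []) (k : Nat) :
    ((PySem.List.pyRange ((k : Int) * players.length) (((k : Int) + 1) * players.length) 1).map
      (fun j =>
        if PySem.Int.mod (PySem.Int.floordiv j players.length) 2 = 0 then
          PySem.List.pyGetD players (PySem.Int.mod j players.length) ""
        else
          PySem.List.pyGetD players (players.length - 1 - PySem.Int.mod j players.length) "")) =
    (if PySem.Int.mod (k : Int) 2 = 0 then players else players.reverse) := by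
  have hn : (0 : Int) < players.length := by
    have := List.length_pos_iff.mpr hne; exact_mod_cast this
  have hrange : PySem.List.pyRange ((k : Int) * players.length) (((k : Int) + 1) * players.length) 1
      = (List.range players.length).map (fun p : Nat => (k : Int) * players.length + (p : Int)) := by
    rw [PySem.List.pyRange_one]
    have h1 : ((k : Int) + 1) * players.length - (k : Int) * players.length = (players.length : Int) := by ring
    rw [h1, Int.toNat_natCast]
  rw [hrange, List.map_map]
  have hpt : ∀ p : Nat, p < players.length →
      PySem.Int.floordiv ((k : Int) * players.length + p) players.length = (k : Int) ∧
      PySem.Int.mod ((k : Int) * players.length + p) players.length = (p : Int) := by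
    intro p hp
    have hp' : (p : Int) < players.length := by exact_mod_cast hp
    have hfd : PySem.Int.floordiv ((k : Int) * players.length + p) players.length = (k : Int) := by
      rw [PySem.Int.floordiv_eq_iff_of_pos hn]
      constructor
      · have : (0:Int) ≤ p := by exact_mod_cast Nat.zero_le p
        omega
      · have : ((k:Int) + 1) * players.length = (k:Int) * players.length + players.length := by ring
        omega
    refine ⟨hfd, ?_⟩
    have := PySem.Int.floordiv_mul_add_mod ((k : Int) * players.length + p) players.length
    rw [hfd] at this
    omega
  by_cases hk : PySem.Int.mod (k : Int) 2 = 0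
  · rw [if_pos hk]
    conv_rhs => rw [← map_getD_range players ""]
    apply List.map_congr_left
    intro p hp
    rw [List.mem_range] at hp
    obtain ⟨h1, h2⟩ := hpt p hp
    simp only [Function.comp_apply, h1, h2, if_pos hk, PySem.List.pyGetD_natCast]
  · rw [if_neg hk]
    conv_rhs => rw [← map_getD_range_rev players ""]
    apply List.map_congr_left
    intro p hp
    rw [List.mem_range] at hp
    obtain ⟨h1, h2⟩ := hpt p hp
    simp only [Function.comp_apply, h1, h2, if_neg hk]
    have hp' : (p : Int) < players.length := by exact_mod_cast hp
    have hge : (0 : Int) ≤ (players.length : Int) - 1 - p := by omega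
    have hlt : (players.length : Int) - 1 - p < players.length := by
      have : (0:Int) ≤ p := by exact_mod_cast Nat.zero_le p
      omega
    rw [PySem.List.pyGetD_eq_getElem _ _ hge hlt]
    have hlt2 : players.length - 1 - p < players.length := by omega
    rw [List.getD_eq_getElem?_getD, List.getElem?_eq_getElem hlt2]
    simp only [Option.getD_some]
    congr 1
    omega

lemma main_lemma (players : List String) (hne : players ≠ []) (k : Nat) :
    get_snake_order players (k : Int) = get_snake_order_alt players (k : Int) := by
  induction k with
  | zero =>
    unfold get_snake_order_alt
    rw [getSnake_flatMap]
    rw [PySem.List.pyRange_one_eq_nil (by simp), PySem.List.pyRange_one_eq_nil (by simp)]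
    rfl
  | succ k ih =>
    rw [getSnake_flatMap] at ih ⊢
    unfold get_snake_order_alt at ih ⊢
    have hn : (0 : Int) ≤ players.length := by positivity
    have hstep : PySem.List.pyRange 0 ((k : Int) + 1) 1
        = PySem.List.pyRange 0 (k : Int) 1 ++ [(k : Int)] := by
      exact PySem.List.pyRange_one_succ_right (by exact_mod_cast Nat.zero_le k)
    have hsplit : PySem.List.pyRange 0 (((k : Int) + 1) * players.length) 1
        = PySem.List.pyRange 0 ((k : Int) * players.length) 1
          ++ PySem.List.pyRange ((k : Int) * players.length) (((k : Int) + 1) * players.length) 1 := by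
      apply PySem.List.pyRange_one_append
      · positivity
      · nlinarith
    push_cast
    rw [hstep, hsplit, List.flatMap_append, List.map_append, ih, List.flatMap_singleton,
        chunk_lemma players hne k]

-- ===== VERDICT (by name: the statement is the Claim_ definition above) =====
theorem get_snake_order_spec : Claim_equal_get_snake_order := by
  intro players t _
  unfold Spec_get_snake_order
  by_cases hne : players = []
  · subst hne
    rw [getSnake_flatMap]
    unfold get_snake_order_alt
    simp
  · by_cases ht : t ≤ 0
    · rw [getSnake_flatMap]
      unfold get_snake_order_alt
      have hn : (0 : Int) ≤ players.length := by positivity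
      rw [PySem.List.pyRange_one_eq_nil ht, PySem.List.pyRange_one_eq_nil (by nlinarith)]
      simp
    · rw [not_le] at ht
      have : t = ((t.toNat : Nat) : Int) := by omega
      rw [this]
      exact main_lemma players hne t.toNat
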